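-- pv_equiv track=rewrite | github.com/pypi-data/pypi-mirror-404 | packages/vibe-remote/vibe_remote-2.1.15-py3-none-any.whl/modules/im/slack.py | _get_default_opencode_agent_name
-- ===== SOURCE A (Python) =====
-- from typing import Dict, Any, Optional, Callable
--
-- def _get_default_opencode_agent_name(opencode_agents: list) -> Optional[str]:
--     """Resolve the default OpenCode agent name."""
--     for agent in opencode_agents:
--         name = agent.get("name")
--         if name == "build":
--             return name
--     for agent in opencode_agents:
--         name = agent.get("name")
--         if name:
--             return name
--     return None
-- ===== SOURCE B (Python) =====
-- def _get_default_opencode_agent_name(opencode_agents: list):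
--     """Single pass: prefer 'build', else latch the first truthy name."""
--     first_nonempty = None
--     for agent in opencode_agents:
--         name = agent.get("name")
--         if name == "build":
--             return name
--         if name and first_nonempty is None:
--             first_nonempty = name
--     return first_nonempty
-- ===== Notes on version B (the rewrite author's own statement) =====
-- stated objective: simpler
-- what changed: Replaces A's two sequential scans of the list with one single-pass loop that returns 'build' immediately and latches the first truthy name in an accumulator.
import Mathlib
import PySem

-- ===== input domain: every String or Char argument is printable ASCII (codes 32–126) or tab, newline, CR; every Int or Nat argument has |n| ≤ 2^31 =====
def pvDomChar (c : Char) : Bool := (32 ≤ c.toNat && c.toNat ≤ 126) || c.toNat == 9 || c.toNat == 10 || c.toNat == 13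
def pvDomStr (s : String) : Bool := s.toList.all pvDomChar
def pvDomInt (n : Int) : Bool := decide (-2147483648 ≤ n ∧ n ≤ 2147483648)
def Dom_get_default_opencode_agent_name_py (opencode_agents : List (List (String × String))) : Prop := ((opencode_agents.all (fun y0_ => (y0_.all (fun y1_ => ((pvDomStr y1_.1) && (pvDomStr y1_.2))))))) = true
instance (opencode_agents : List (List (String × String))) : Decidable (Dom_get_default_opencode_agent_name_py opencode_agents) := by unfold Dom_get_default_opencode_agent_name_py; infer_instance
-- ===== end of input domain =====

-- B merges A's two sequential scans into one pass with a latched accumulator (objective: simpler).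

-- ===== PORT A =====
-- first loop of A: return name as soon as it equals "build"
def pvA_loop1 : List (List (String × String)) → Option String
  | [] => none
  | agent :: rest =>
    let name := PySem.Dict.get? (PySem.Dict.mk agent) "name"
    if name = some "build" then name else pvA_loop1 rest

-- second loop of A: return the first truthy name ('if name:' — present and nonempty)
def pvA_loop2 : List (List (String × String)) → Option String
  | [] => none
  | agent :: rest =>
    let name := PySem.Dict.get? (PySem.Dict.mk agent) "name"
    if name.getD "" ≠ "" then name else pvA_loop2 rest

def get_default_opencode_agent_name_py (opencode_agents : List (List (String × String))) : Option String :=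
  match pvA_loop1 opencode_agents with
  | some n => some n
  | none => pvA_loop2 opencode_agents

-- ===== PORT B =====
-- single pass; acc is first_nonempty, latched only when still none
def pvB_loop : List (List (String × String)) → Option String → Option String
  | [], acc => acc
  | agent :: rest, acc =>
    let name := PySem.Dict.get? (PySem.Dict.mk agent) "name"
    if name = some "build" then name
    else if name.getD "" ≠ "" ∧ acc = none then pvB_loop rest name
    else pvB_loop rest acc

def get_default_opencode_agent_name_py_alt (opencode_agents : List (List (String × String))) : Option String :=
  pvB_loop opencode_agents none

-- ===== PRECONDITION & SPEC =====
def Spec_get_default_opencode_agent_name_py (opencode_agents : List (List (String × String))) (out : Option String) : Prop := out = get_default_opencode_agent_name_py_alt opencode_agents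
instance (opencode_agents : List (List (String × String))) (out : Option String) : Decidable (Spec_get_default_opencode_agent_name_py opencode_agents out) := by unfold Spec_get_default_opencode_agent_name_py; infer_instance

-- ===== CLAIM (what is proved, stated in full; the proofs are below) =====
def Claim_equal_get_default_opencode_agent_name_py : Prop := ∀ (opencode_agents : List (List (String × String))), Dom_get_default_opencode_agent_name_py opencode_agents → Spec_get_default_opencode_agent_name_py opencode_agents (get_default_opencode_agent_name_py opencode_agents)

-- ===== LEMMAS AND PROOFS =====

-- B's loop = (A's first scan) orElse (the latched acc) orElse (A's second scan)
theorem pvB_loop_eq (xs : List (List (String × String))) :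
    ∀ acc : Option String,
      pvB_loop xs acc =
        match pvA_loop1 xs with
        | some n => some n
        | none => match acc with
                  | some a => some a
                  | none => pvA_loop2 xs := by
  induction xs with
  | nil => intro acc; cases acc <;> simp [pvB_loop, pvA_loop1, pvA_loop2]
  | cons agent rest ih =>
    intro acc
    simp only [pvB_loop, pvA_loop1, pvA_loop2]
    by_cases hb : PySem.Dict.get? (PySem.Dict.mk agent) "name" = some "build"
    · simp [hb]
    · by_cases hn : (PySem.Dict.get? (PySem.Dict.mk agent) "name").getD "" ≠ ""
      · cases hname : PySem.Dict.get? (PySem.Dict.mk agent) "name" with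
        | none => rw [hname] at hn; simp at hn
        | some s =>
          rw [hname] at hb hn
          simp at hb hn
          cases acc with
          | none => simp [hb, hn, ih]
          | some a => simp [hb, hn, ih]
      · simp [hb, hn, ih]

-- ===== VERDICT (by name: the statement is the Claim_ definition above) =====
theorem get_default_opencode_agent_name_py_spec : Claim_equal_get_default_opencode_agent_name_py := by
  intro xs _
  unfold Spec_get_default_opencode_agent_name_py get_default_opencode_agent_name_py get_default_opencode_agent_name_py_alt
  rw [pvB_loop_eq]
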